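-- pv_equiv track=rewrite | github.com/arturoornelasb/tibia-bonelord-469-cipher | archive/scripts/sessions/crack_session12j.py | find_codes_for_text
-- ===== SOURCE A (Python) =====
-- def find_codes_for_text(target, collapsed, decoded, codes):
--     """Find the raw codes that produce a given collapsed text substring"""
--     idx = collapsed.find(target)
--     if idx == -1:
--         return None, -1
--
--     # Map collapsed position to decoded position
--     ci = 0
--     di = 0
--     while ci < idx and di < len(decoded):
--         while di + 1 < len(decoded) and decoded[di+1] == decoded[di]:
--             di += 1
--         ci += 1
--         di += 1
--
--     start_di = di
--     ci_end = ci + len(target)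
--     while ci < ci_end and di < len(decoded):
--         while di + 1 < len(decoded) and decoded[di+1] == decoded[di]:
--             di += 1
--         ci += 1
--         di += 1
--     end_di = di
--
--     # Each decoded char = 1 code
--     return codes[start_di:end_di], start_di
-- ===== SOURCE B (Python) =====
-- def find_codes_for_text(target, collapsed, decoded, codes):
--     """Find the raw codes that produce a given collapsed text substring"""
--     idx = collapsed.find(target)
--     if idx == -1:
--         return None, -1
--     # one pass: decoded index where each run of equal consecutive chars begins,
--     # plus a sentinel len(decoded); then two O(1) clamped lookups
--     starts = [i for i in range(len(decoded)) if i == 0 or decoded[i] != decoded[i - 1]]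
--     starts.append(len(decoded))
--     r = len(starts) - 1
--     start_di = starts[min(idx, r)]
--     end_di = starts[min(idx + len(target), r)]
--     return codes[start_di:end_di], start_di
-- ===== Notes on version B (the rewrite author's own statement) =====
-- stated objective: alternative
-- what changed: Replaces the two interleaved run-walking while-loops with a single pass that builds the list of run-start indices (plus a sentinel) and then maps the found position and its end to decoded positions by two O(1) clamped lookups.
import Mathlib
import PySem

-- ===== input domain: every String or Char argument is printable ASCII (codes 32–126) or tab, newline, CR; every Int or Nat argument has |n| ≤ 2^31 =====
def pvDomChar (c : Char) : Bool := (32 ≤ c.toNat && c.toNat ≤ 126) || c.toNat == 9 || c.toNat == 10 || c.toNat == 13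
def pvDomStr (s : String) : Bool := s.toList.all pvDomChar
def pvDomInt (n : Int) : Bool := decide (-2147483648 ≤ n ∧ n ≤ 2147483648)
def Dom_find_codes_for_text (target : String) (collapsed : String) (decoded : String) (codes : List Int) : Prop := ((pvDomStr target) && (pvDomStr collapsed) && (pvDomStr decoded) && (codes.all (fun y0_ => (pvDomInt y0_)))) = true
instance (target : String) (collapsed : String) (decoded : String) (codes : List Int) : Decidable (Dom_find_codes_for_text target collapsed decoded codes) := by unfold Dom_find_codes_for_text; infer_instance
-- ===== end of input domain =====

-- B replaces A's two interleaved run-walking loops by one pass building the run-start index list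
-- (with a sentinel) and two O(1) clamped lookups; same return value everywhere.

-- ===== PORT A =====
-- A's inner `while di+1 < len(decoded) and decoded[di+1] == decoded[di]: di += 1`
def pvSkipRun (d : List Char) (di : Nat) : Nat :=
  if h : di + 1 < d.length ∧ d[di+1]! = d[di]! then pvSkipRun d (di + 1) else di
termination_by d.length - di
decreasing_by have := h.1; omega

-- A's outer `while ci < stop and di < len(decoded): <inner>; ci += 1; di += 1`
def pvLoopA (d : List Char) (stop : Nat) (ci di : Nat) : Nat × Nat :=
  if h : ci < stop ∧ di < d.length then pvLoopA d stop (ci + 1) (pvSkipRun d di + 1) else (ci, di)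
termination_by stop - ci
decreasing_by have := h.1; omega

def find_codes_for_text (target : String) (collapsed : String) (decoded : String) (codes : List Int) : Option (List Int) × Int :=
  let idx := PySem.Str.find collapsed target
  if idx = -1 then (none, -1)
  else
    let d := decoded.toList
    let p1 := pvLoopA d idx.toNat 0 0
    let start_di := p1.2
    let p2 := pvLoopA d (p1.1 + (PySem.Str.len target).toNat) p1.1 start_di
    let end_di := p2.2
    (some (PySem.List.slice codes (some (start_di : Int)) (some (end_di : Int))), (start_di : Int))

-- ===== PORT B =====
-- Source B's comprehension: [i for i in range(len(decoded)) if i == 0 or decoded[i] != decoded[i-1]]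
def pvRunStarts (d : List Char) : List Nat :=
  (List.range d.length).filter (fun i => decide (i = 0 ∨ d[i]! ≠ d[i-1]!))

def find_codes_for_text_alt (target : String) (collapsed : String) (decoded : String) (codes : List Int) : Option (List Int) × Int :=
  let idx := PySem.Str.find collapsed target
  if idx = -1 then (none, -1)
  else
    let d := decoded.toList
    let starts := pvRunStarts d ++ [d.length]
    let r := starts.length - 1
    let start_di := starts[min idx.toNat r]!
    let end_di := starts[min (idx.toNat + (PySem.Str.len target).toNat) r]!
    (some (PySem.List.slice codes (some (start_di : Int)) (some (end_di : Int))), (start_di : Int))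

-- ===== PRECONDITION & SPEC =====
def Spec_find_codes_for_text (target : String) (collapsed : String) (decoded : String) (codes : List Int) (out : Option (List Int) × Int) : Prop := out = find_codes_for_text_alt target collapsed decoded codes
instance (target : String) (collapsed : String) (decoded : String) (codes : List Int) (out : Option (List Int) × Int) : Decidable (Spec_find_codes_for_text target collapsed decoded codes out) := by unfold Spec_find_codes_for_text; infer_instance

-- ===== CLAIM (what is proved, stated in full; the proofs are below) =====
def Claim_equal_find_codes_for_text : Prop := ∀ (target : String) (collapsed : String) (decoded : String) (codes : List Int), Dom_find_codes_for_text target collapsed decoded codes → Spec_find_codes_for_text target collapsed decoded codes (find_codes_for_text target collapsed decoded codes)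

-- ===== LEMMAS AND PROOFS =====

lemma pvSkipRun_ge (d : List Char) (di : Nat) : di ≤ pvSkipRun d di := by
  fun_induction pvSkipRun d di with
  | case1 di h ih => omega
  | case2 di h => omega

lemma pvSkipRun_lt (d : List Char) (di : Nat) (h : di < d.length) : pvSkipRun d di < d.length := by
  fun_induction pvSkipRun d di with
  | case1 di h' ih => exact ih h'.1
  | case2 di h' => exact h

lemma pvSkipRun_interior (d : List Char) (di : Nat) (k : Nat) (h1 : di < k) (h2 : k ≤ pvSkipRun d di) :
    d[k]! = d[k-1]! := by
  fun_induction pvSkipRun d di with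
  | case1 di h ih =>
      rcases Nat.lt_or_ge (di + 1) k with hk | hk
      · exact ih hk h2
      · have : k = di + 1 := by omega
        subst this; simpa using h.2
  | case2 di h => omega

lemma pvSkipRun_exit (d : List Char) (di : Nat) (h : pvSkipRun d di + 1 < d.length) :
    d[pvSkipRun d di + 1]! ≠ d[pvSkipRun d di]! := by
  fun_induction pvSkipRun d di with
  | case1 di h' ih => exact ih h
  | case2 di h' =>
      intro hc
      exact h' ⟨h, hc⟩

-- the run-start list built from 0 by repeatedly jumping past a run
def pvF (d : List Char) (i : Nat) : List Nat :=
  if h : i < d.length then i :: pvF d (pvSkipRun d i + 1) else []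
termination_by d.length - i
decreasing_by have := pvSkipRun_ge d i; omega

lemma pvF_cons (d : List Char) (i : Nat) (h : i < d.length) :
    pvF d i = i :: pvF d (pvSkipRun d i + 1) := by
  rw [pvF]; rw [dif_pos h]

lemma pvF_nil (d : List Char) (i : Nat) (h : ¬ i < d.length) : pvF d i = [] := by
  rw [pvF]; rw [dif_neg h]

-- Source B's filtered range, started anywhere from a run start, is the jump list pvF
lemma pvFilter_from (d : List Char) : ∀ m a, d.length - a = m → a ≤ d.length →
    (a < d.length → (a = 0 ∨ d[a]! ≠ d[a-1]!)) →
    (List.range' a m).filter (fun i => decide (i = 0 ∨ d[i]! ≠ d[i-1]!)) = pvF d a := by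
  intro m
  induction m using Nat.strong_induction_on with
  | _ m ih =>
    intro a hm ha hP
    by_cases h : a < d.length
    · have hm1 : m = (d.length - (a+1)) + 1 := by omega
      rw [pvF_cons d a h, hm1, List.range'_succ]
      simp only [List.filter_cons, decide_eq_true (hP h)]
      rw [if_pos trivial]
      congr 1
      set s := pvSkipRun d a with hs
      have hsge : a ≤ s := pvSkipRun_ge d a
      have hslt : s < d.length := pvSkipRun_lt d a h
      have h2 : (a + 1) + 1 * (s - a) = s + 1 := by omega
      have hsplit : List.range' (a+1) (d.length - (a+1)) =
          List.range' (a+1) (s - a) ++ List.range' (s+1) (d.length - (s+1)) := by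
        calc List.range' (a+1) (d.length - (a+1))
            = List.range' (a+1) ((s - a) + (d.length - (s+1))) := by congr 1; omega
          _ = List.range' (a+1) (s-a) ++ List.range' ((a+1) + 1*(s-a)) (d.length - (s+1)) :=
              List.range'_append.symm
          _ = _ := by rw [h2]
      rw [hsplit, List.filter_append]
      have hnil : (List.range' (a+1) (s - a)).filter (fun i => decide (i = 0 ∨ d[i]! ≠ d[i-1]!)) = [] := by
        apply List.filter_eq_nil_iff.mpr
        intro k hk
        have hk' := List.mem_range'_1.mp hk
        have h0 : k ≠ 0 := by omega
        have heq : d[k]! = d[k-1]! := pvSkipRun_interior d a k (by omega) (by omega)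
        simp [h0, heq]
      rw [hnil, List.nil_append]
      exact ih (d.length - (s+1)) (by omega) (s+1) rfl (by omega)
        (fun hlt => Or.inr (pvSkipRun_exit d a hlt))
    · have ha' : a = d.length := by omega
      have hm0 : m = 0 := by omega
      rw [pvF_nil d a h, hm0]
      simp

lemma pvRunStarts_eq_pvF (d : List Char) : pvRunStarts d = pvF d 0 := by
  unfold pvRunStarts
  rw [List.range_eq_range']
  exact pvFilter_from d d.length 0 (by omega) (by omega) (fun _ => Or.inl rfl)

-- A's outer loop characterized by the jump list: it consumes min(stop-ci, #runs) runs
lemma pvLoopA_char (d : List Char) (stop : Nat) : ∀ m i c, d.length - i = m → i ≤ d.length →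
    pvLoopA d stop c i = (c + min (stop - c) (pvF d i).length,
      ((pvF d i) ++ [d.length]).getD (min (stop - c) (pvF d i).length) d.length) := by
  intro m
  induction m using Nat.strong_induction_on with
  | _ m ih =>
    intro i c hm hi
    by_cases h : c < stop ∧ i < d.length
    · rw [pvLoopA, dif_pos h]
      have hge := pvSkipRun_ge d i
      have hlt := pvSkipRun_lt d i h.2
      rw [ih (d.length - (pvSkipRun d i + 1)) (by omega) (pvSkipRun d i + 1) (c+1) rfl (by omega)]
      rw [pvF_cons d i h.2]
      have hmin : min (stop - c) ((pvF d (pvSkipRun d i + 1)).length + 1)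
          = min (stop - (c+1)) (pvF d (pvSkipRun d i + 1)).length + 1 := by omega
      simp only [List.length_cons, hmin, List.cons_append, List.getD_cons_succ,
        Prod.mk.injEq]
      exact ⟨by omega, trivial⟩
    · rw [pvLoopA, dif_neg h]
      rcases Nat.lt_or_ge i d.length with h2 | h2
      · have hc : ¬ c < stop := fun hc => h ⟨hc, h2⟩
        have h0 : stop - c = 0 := by omega
        rw [pvF_cons d i h2]
        simp [h0]
      · have hi' : i = d.length := by omega
        rw [pvF_nil d i (by omega)]
        simp [hi']

-- the decoded position reached after k consumed runs, and the remaining jump list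
lemma pvF_getD (d : List Char) : ∀ k i, i ≤ d.length → k ≤ (pvF d i).length →
    ((pvF d i) ++ [d.length]).getD k d.length ≤ d.length ∧
    pvF d (((pvF d i) ++ [d.length]).getD k d.length) = (pvF d i).drop k := by
  intro k
  induction k with
  | zero =>
    intro i hi _
    by_cases h : i < d.length
    · rw [pvF_cons d i h]
      refine ⟨by simpa using Nat.le_of_lt h, ?_⟩
      simpa using pvF_cons d i h
    · have hi' : i = d.length := by omega
      rw [pvF_nil d i h]
      subst hi'
      exact ⟨by simp, by simpa using pvF_nil d d.length (by omega)⟩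
  | succ k ih =>
    intro i hi hk
    by_cases h : i < d.length
    · have hge := pvSkipRun_ge d i
      have hlt := pvSkipRun_lt d i h
      have hk' : k ≤ (pvF d (pvSkipRun d i + 1)).length := by
        rw [pvF_cons d i h] at hk; simpa using hk
      have hih := ih (pvSkipRun d i + 1) (by omega) hk'
      rw [pvF_cons d i h]
      simpa using hih
    · rw [pvF_nil d i h] at hk
      simp at hk

-- getElem! = getD when in bounds
lemma pvGetBang (l : List Nat) (j : Nat) (dflt : Nat) (h : j < l.length) : l[j]! = l.getD j dflt := by
  simp [List.getElem!_eq_getElem?_getD, List.getD_eq_getElem?_getD, List.getElem?_eq_getElem h]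

-- both of A's loop results, expressed as clamped lookups in the jump list
lemma pvMain (d : List Char) (I T : Nat) :
    ((pvLoopA d I 0 0).2 = (pvF d 0 ++ [d.length]).getD (min I (pvF d 0).length) d.length) ∧
    ((pvLoopA d ((pvLoopA d I 0 0).1 + T) (pvLoopA d I 0 0).1 (pvLoopA d I 0 0).2).2
        = (pvF d 0 ++ [d.length]).getD (min (I + T) (pvF d 0).length) d.length) := by
  have h1 := pvLoopA_char d I d.length 0 0 (by omega) (Nat.zero_le _)
  simp only [Nat.sub_zero, Nat.zero_add] at h1
  have hm1R : min I (pvF d 0).length ≤ (pvF d 0).length := min_le_right _ _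
  obtain ⟨hle, hdrop⟩ := pvF_getD d (min I (pvF d 0).length) 0 (Nat.zero_le _) hm1R
  have h2 := pvLoopA_char d (min I (pvF d 0).length + T)
      (d.length - (pvF d 0 ++ [d.length]).getD (min I (pvF d 0).length) d.length)
      ((pvF d 0 ++ [d.length]).getD (min I (pvF d 0).length) d.length)
      (min I (pvF d 0).length) rfl hle
  rw [hdrop] at h2
  have hld : ((pvF d 0).drop (min I (pvF d 0).length)).length
      = (pvF d 0).length - min I (pvF d 0).length := by simp
  have hgd : ∀ t, (((pvF d 0).drop (min I (pvF d 0).length)) ++ [d.length]).getD t d.length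
      = (pvF d 0 ++ [d.length]).getD (min I (pvF d 0).length + t) d.length := by
    intro t
    rw [← List.drop_append_of_le_length (min_le_right _ _)]
    simp [List.getD_eq_getElem?_getD, List.getElem?_drop]
  rw [hld, hgd] at h2
  have harith : min I (pvF d 0).length + T - min I (pvF d 0).length = T := by omega
  rw [harith] at h2
  have hfin : min I (pvF d 0).length + min T ((pvF d 0).length - min I (pvF d 0).length)
      = min (I + T) (pvF d 0).length := by omega
  rw [hfin] at h2
  refine ⟨by rw [h1], ?_⟩
  rw [h1]
  simpa using congrArg Prod.snd h2

-- ===== VERDICT (by name: the statement is the Claim_ definition above) =====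
theorem find_codes_for_text_spec : Claim_equal_find_codes_for_text := by
  unfold Claim_equal_find_codes_for_text
  intro target collapsed decoded codes _
  unfold Spec_find_codes_for_text find_codes_for_text find_codes_for_text_alt
  by_cases hidx : PySem.Str.find collapsed target = -1
  · simp only [if_pos hidx]
  · simp only [if_neg hidx]
    rw [pvRunStarts_eq_pvF]
    obtain ⟨hA1, hA2⟩ := pvMain decoded.toList (PySem.Str.find collapsed target).toNat
      (PySem.Str.len target).toNat
    have hlen : (pvF decoded.toList 0 ++ [decoded.toList.length]).length - 1
        = (pvF decoded.toList 0).length := by simp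
    rw [hlen]
    rw [pvGetBang _ _ decoded.toList.length (by simp),
        pvGetBang _ _ decoded.toList.length (by simp)]
    rw [← hA1, ← hA2]
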